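-- pv_equiv track=rewrite | github.com/Ls-Jan/XJ_Python | XJ/Deprecated/SpecialDay.py | GetSpecialDay_Year
-- ===== SOURCE A (Python) =====
-- def IsLeapYear(year):#判断闰年
--     if(year%400==0):
--         return True
--     elif(year%4==0 and year%100!=0):
--         return True
--     else:
--         return False
--
-- def GetSpecialDay_Month(days,weekNum):#传入月的天数，以及月的第一天对应的星期数。返回列表[day,day,...]
--     if(weekNum==1):
--         return list(range(1,8))
--     elif(weekNum==5):
--         return list(range(11,18))
--     elif(weekNum==2):
--         return list(range(21,28))
--     elif(weekNum==6 and days>30):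
--         return [31]
--     else:
--         return []
--
-- def GetSpecialDay_Year(year,weekNum):#传入年号，以及元旦(1月1日)对应的星期数。返回字典{month:[day,day,...],...}
--     monthDays=[31,28,31,30,31,30,31,31,30,31,30,31]
--     monthDays[1]=29 if IsLeapYear(year) else 28
--     rst=dict()
--     for month in range(12):
--         days=monthDays[month]
--         lst=GetSpecialDay_Month(days,weekNum)
--         if(len(lst)):
--             rst[month+1]=lst
--         weekNum+=days-28
--         if(weekNum>7):
--             weekNum-=7
--     return rst
-- ===== SOURCE B (Python) =====
-- # B: recursive descent over the enumerated month lengths building the (month, days) pairs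
-- # list directly (table-driven classification), then one dict() conversion at the end.
-- def GetSpecialDay_Year(year, weekNum):
--     leap = year % 4 == 0 and (year % 100 != 0 or year % 400 == 0)
--     lengths = [31, 29 if leap else 28, 31, 30, 31, 30, 31, 31, 30, 31, 30, 31]
--     starts = {1: 1, 5: 11, 2: 21}
--
--     def go(pairs, w):
--         if not pairs:
--             return []
--         (m, d) = pairs[0]
--         nw = w + d - 28
--         if nw > 7:
--             nw -= 7
--         tail = go(pairs[1:], nw)
--         s = starts.get(w)
--         if s is not None:
--             return [(m, list(range(s, s + 7)))] + tail
--         if w == 6 and d == 31: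
--             return [(m, [31])] + tail
--         return tail
--
--     return dict(go(list(enumerate(lengths, 1)), weekNum))
-- ===== Notes on version B (the rewrite author's own statement) =====
-- stated objective: alternative
-- what changed: Replaces the dict-mutating for-loop with if-elif classification by a recursive descent over the enumerated month lengths that builds the non-empty (month, days) pairs directly via a start-day lookup table and converts to a dict once at the end.
import Mathlib
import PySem

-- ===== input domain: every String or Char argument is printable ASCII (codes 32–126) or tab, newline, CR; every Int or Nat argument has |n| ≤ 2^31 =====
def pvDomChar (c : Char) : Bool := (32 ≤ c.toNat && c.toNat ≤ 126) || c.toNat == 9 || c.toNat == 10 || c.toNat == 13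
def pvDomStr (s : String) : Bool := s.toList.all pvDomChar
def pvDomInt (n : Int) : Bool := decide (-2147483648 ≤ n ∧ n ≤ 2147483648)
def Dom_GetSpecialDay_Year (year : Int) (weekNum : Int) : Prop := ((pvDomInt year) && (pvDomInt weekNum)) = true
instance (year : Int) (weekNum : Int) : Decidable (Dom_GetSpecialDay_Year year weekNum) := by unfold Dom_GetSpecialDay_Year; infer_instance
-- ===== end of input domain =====

-- B replaces A's dict-mutating loop and if-elif chain by a recursive descent over the
-- enumerated month lengths with a start-day lookup table, converting to a dict once at the end
-- (alternative decomposition, same cost).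


-- ===== PORT A =====
def IsLeapYear (year : Int) : Bool :=
  if PySem.Int.mod year 400 == 0 then true
  else if PySem.Int.mod year 4 == 0 && PySem.Int.mod year 100 != 0 then true
  else false

def GetSpecialDay_Month (days : Int) (weekNum : Int) : List Int :=
  if weekNum == 1 then PySem.List.pyRange 1 8 1
  else if weekNum == 5 then PySem.List.pyRange 11 18 1
  else if weekNum == 2 then PySem.List.pyRange 21 28 1
  else if weekNum == 6 && days > 30 then [31]
  else []

-- A's loop over range(12), threading (rst, weekNum); monthDays[1]=… is the conditional entry.
def GetSpecialDay_Year (year : Int) (weekNum : Int) : List (Int × List Int) :=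
  let monthDays : List Int :=
    [31, if IsLeapYear year then 29 else 28, 31, 30, 31, 30, 31, 31, 30, 31, 30, 31]
  let st := (PySem.List.pyRange 0 12 1).foldl
    (fun (s : PySem.Dict Int (List Int) × Int) month =>
      let days := PySem.List.pyGetD monthDays month 0
      let lst := GetSpecialDay_Month days s.2
      let rst := if lst.length ≠ 0 then s.1.insert (month + 1) lst else s.1
      let w := s.2 + (days - 28)
      (rst, if w > 7 then w - 7 else w))
    (PySem.Dict.empty, weekNum)
  st.1.items

-- ===== PORT B =====
def pvStarts : PySem.Dict Int Int := PySem.Dict.ofList [(1, 1), (5, 11), (2, 21)]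

def pvGo (pairs : List (Int × Int)) (w : Int) : List (Int × List Int) :=
  match pairs with
  | [] => []
  | (m, d) :: rest =>
    let nw0 := w + d - 28
    let nw := if nw0 > 7 then nw0 - 7 else nw0
    let tail := pvGo rest nw
    match pvStarts.get? w with
    | some s => (m, PySem.List.pyRange s (s + 7) 1) :: tail
    | none => if w == 6 && d == 31 then (m, [31]) :: tail else tail

def GetSpecialDay_Year_alt (year : Int) (weekNum : Int) : List (Int × List Int) :=
  let leap := PySem.Int.mod year 4 == 0 &&
    (PySem.Int.mod year 100 != 0 || PySem.Int.mod year 400 == 0)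
  let lengths : List Int :=
    [31, if leap then 29 else 28, 31, 30, 31, 30, 31, 31, 30, 31, 30, 31]
  (PySem.Dict.ofList (pvGo (PySem.List.enumerate lengths 1) weekNum)).items

-- ===== PRECONDITION & SPEC =====
def Spec_GetSpecialDay_Year (year : Int) (weekNum : Int) (out : List (Int × List Int)) : Prop := out = GetSpecialDay_Year_alt year weekNum
instance (year : Int) (weekNum : Int) (out : List (Int × List Int)) : Decidable (Spec_GetSpecialDay_Year year weekNum out) := by unfold Spec_GetSpecialDay_Year; infer_instance

-- ===== CLAIM (what is proved, stated in full; the proofs are below) =====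
def Claim_equal_GetSpecialDay_Year : Prop := ∀ (year : Int) (weekNum : Int), Dom_GetSpecialDay_Year year weekNum → Spec_GetSpecialDay_Year year weekNum (GetSpecialDay_Year year weekNum)

-- ===== LEMMAS AND PROOFS =====

theorem pvLeap_eq (year : Int) :
    IsLeapYear year
      = (PySem.Int.mod year 4 == 0 &&
          (PySem.Int.mod year 100 != 0 || PySem.Int.mod year 400 == 0)) := by
  unfold IsLeapYear
  have h4 := PySem.Int.mod_eq_zero_iff_dvd year 4
  have h100 := PySem.Int.mod_eq_zero_iff_dvd year 100
  have h400 := PySem.Int.mod_eq_zero_iff_dvd year 400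
  by_cases a : PySem.Int.mod year 400 = 0 <;>
  by_cases b : PySem.Int.mod year 4 = 0 <;>
  by_cases c : PySem.Int.mod year 100 = 0 <;>
  simp_all <;>
  exact absurd (dvd_trans (by norm_num : (4:Int) ∣ 400) ‹(400:Int) ∣ year›) ‹¬ (4:Int) ∣ year›

theorem pvGo_keys_sublist (pairs : List (Int × Int)) (w : Int) :
    ((pvGo pairs w).map (·.1)).Sublist (pairs.map (·.1)) := by
  induction pairs generalizing w with
  | nil => simp [pvGo]
  | cons p rest ih =>
    obtain ⟨m, d⟩ := p
    simp only [pvGo, List.map_cons]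
    cases h : pvStarts.get? w with
    | some s => simpa [h] using List.Sublist.cons₂ m (ih (if w + d - 28 > 7 then w + d - 28 - 7 else w + d - 28))
    | none =>
      by_cases hw : (w == 6 && d == 31) = true
      · simp [hw]; exact ih _
      · simp only [Bool.not_eq_true] at hw
        simp [hw]
        exact List.Sublist.cons _ (ih _)

theorem pvMain :
    ∀ (ds : List Int) (i w : Int) (acc : PySem.Dict Int (List Int)),
      (∀ k, acc.contains k = true → k ≤ i) →
      (∀ d ∈ ds, d ≤ 31) →
      (((PySem.List.enumerate ds i).foldl
          (fun (s : PySem.Dict Int (List Int) × Int) p =>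
            let days := p.2
            let lst := GetSpecialDay_Month days s.2
            let rst := if lst.length ≠ 0 then s.1.insert (p.1 + 1) lst else s.1
            let w := s.2 + (days - 28)
            (rst, if w > 7 then w - 7 else w))
          (acc, w)).1).items
        = acc.items ++ pvGo (PySem.List.enumerate ds (i + 1)) w := by
  intro ds
  induction ds with
  | nil => intro i w acc hacc hds; simp [PySem.List.enumerate_nil, pvGo]
  | cons d ds ih =>
    intro i w acc hacc hds
    rw [PySem.List.enumerate_cons, PySem.List.enumerate_cons]
    simp only [List.foldl_cons]
    have hfresh : acc.contains (i + 1) = false := by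
      by_contra h
      have := hacc (i + 1) (by revert h; cases acc.contains (i+1) <;> simp)
      omega
    have harith : w + (d - 28) = w + d - 28 := by ring
    have hd31 : d ≤ 31 := hds d (List.mem_cons_self ..)
    -- characterise one step
    have hstep : ∀ lst : List Int,
        lst = GetSpecialDay_Month d w →
        ((if lst.length ≠ 0 then acc.insert (i + 1) lst else acc)).items
          = acc.items ++ (match pvStarts.get? w with
              | some s => [((i:Int) + 1, PySem.List.pyRange s (s + 7) 1)]
              | none => if w == 6 && d == 31 then [((i:Int)+1, ([31] : List Int))] else []) := by
      intro lst hlst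
      by_cases h1 : w = 1
      · subst h1; subst hlst
        have hl : GetSpecialDay_Month d 1 = PySem.List.pyRange 1 8 1 := by
          simp [GetSpecialDay_Month]
        rw [hl, if_pos (by decide), PySem.Dict.items_insert_of_not_contains acc _ hfresh]
        simp [show pvStarts.get? 1 = some 1 by decide, show (1:Int) + 7 = 8 by norm_num]
      · by_cases h5 : w = 5
        · subst h5; subst hlst
          have hl : GetSpecialDay_Month d 5 = PySem.List.pyRange 11 18 1 := by
            simp [GetSpecialDay_Month]
          rw [hl, if_pos (by decide), PySem.Dict.items_insert_of_not_contains acc _ hfresh]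
          simp [show pvStarts.get? 5 = some 11 by decide, show (11:Int) + 7 = 18 by norm_num]
        · by_cases h2 : w = 2
          · subst h2; subst hlst
            have hl : GetSpecialDay_Month d 2 = PySem.List.pyRange 21 28 1 := by
              simp [GetSpecialDay_Month]
            rw [hl, if_pos (by decide), PySem.Dict.items_insert_of_not_contains acc _ hfresh]
            simp [show pvStarts.get? 2 = some 21 by decide, show (21:Int) + 7 = 28 by norm_num]
          · have hnone : pvStarts.get? w = none := by
              simp [pvStarts, PySem.Dict.ofList, PySem.Dict.update, PySem.Dict.get?_insert, h1, h2, h5]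
            rw [hnone]
            by_cases h6 : w = 6
            · subst h6; subst hlst
              by_cases hd : d = 31
              · subst hd
                have hl : GetSpecialDay_Month 31 6 = [31] := by decide
                rw [hl, if_pos (by decide), PySem.Dict.items_insert_of_not_contains acc _ hfresh]
                simp
              · have : ¬ d > 30 := by omega
                simp [GetSpecialDay_Month, hd, this]
            · subst hlst
              simp [GetSpecialDay_Month, h1, h5, h2, h6]
    -- now unfold pvGo on the rhs
    conv_rhs => rw [pvGo]
    rw [ih (i+1) _ _ ?_ (fun x hx => hds x (List.mem_cons_of_mem _ hx))]
    · rw [hstep _ rfl]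
      cases hg : pvStarts.get? w with
      | some s => simp [harith, List.append_assoc]
      | none =>
        by_cases h6 : (w == 6 && d == 31) = true
        · simp [h6, harith, List.append_assoc]
        · simp only [Bool.not_eq_true] at h6
          simp [h6, harith]
    · intro k hk
      by_cases hlen : (GetSpecialDay_Month d w).length ≠ 0
      · rw [if_pos hlen] at hk
        rw [PySem.Dict.contains_insert] at hk
        rcases Bool.or_eq_true_iff.mp hk with h | h
        · have : k = i + 1 := by exact_mod_cast (beq_iff_eq).mp h
          omega
        · have := hacc k h; omega
      · rw [if_neg hlen] at hk
        have := hacc k hk; omega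

theorem pvItems_ofList {ν : Type} (l : List (Int × ν)) (h : (l.map (·.1)).Nodup) :
    (PySem.Dict.ofList l).items = l := by
  have := PySem.Dict.items_foldl_insert_fresh (l := l) (k := (·.1)) (v := (·.2))
      (d := (PySem.Dict.empty : PySem.Dict Int ν)) (by simp) h
  simpa [PySem.Dict.ofList, PySem.Dict.update] using this

-- A's fold over range(12) with indexing is the fold over the enumerated list
theorem pvA_fold (year weekNum : Int) :
    GetSpecialDay_Year year weekNum
      = (((PySem.List.enumerate
            ([31, if IsLeapYear year then 29 else 28, 31, 30, 31, 30, 31, 31, 30, 31, 30, 31] : List Int) 0).foldl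
          (fun (s : PySem.Dict Int (List Int) × Int) p =>
            let days := p.2
            let lst := GetSpecialDay_Month days s.2
            let rst := if lst.length ≠ 0 then s.1.insert (p.1 + 1) lst else s.1
            let w := s.2 + (days - 28)
            (rst, if w > 7 then w - 7 else w))
          (PySem.Dict.empty, weekNum)).1).items := by
  unfold GetSpecialDay_Year
  rw [PySem.List.enumerate_eq_map_pyRange _ (0:Int), List.foldl_map,
    show PySem.List.len
      ([31, if IsLeapYear year then 29 else 28, 31, 30, 31, 30, 31, 31, 30, 31, 30, 31] : List Int)
      = 12 from by simp [PySem.List.len]]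

-- ===== VERDICT (by name: the statement is the Claim_ definition above) =====
theorem GetSpecialDay_Year_spec : Claim_equal_GetSpecialDay_Year := by
  intro year weekNum _
  unfold Spec_GetSpecialDay_Year GetSpecialDay_Year_alt
  rw [← pvLeap_eq, pvA_fold]
  set monthDays : List Int :=
    [31, if IsLeapYear year then 29 else 28, 31, 30, 31, 30, 31, 31, 30, 31, 30, 31] with hmd
  have hnodup : ((pvGo (PySem.List.enumerate monthDays 1) weekNum).map (·.1)).Nodup := by
    have hsub := pvGo_keys_sublist (PySem.List.enumerate monthDays 1) weekNum
    refine hsub.nodup ?_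
    rw [PySem.List.map_fst_enumerate]
    exact PySem.List.nodup_pyRange_one 1 _
  rw [pvItems_ofList _ hnodup]
  rw [pvMain monthDays 0 weekNum PySem.Dict.empty (by simp) ?_]
  · simp [show (0:Int) + 1 = 1 by norm_num, show (PySem.Dict.empty : PySem.Dict Int (List Int)).items = [] from rfl]
  · intro d hd
    simp only [hmd, List.mem_cons, List.not_mem_nil, or_false] at hd
    rcases hd with h|h|h|h|h|h|h|h|h|h|h|h <;> omega
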